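-- pv_equiv track=rewrite | github.com/TrentFranks/ssNMR-Topspin-Python | modules/bruTS3p1.py | pp_2_xcmd
-- ===== SOURCE A (Python) =====
-- def pp_2_xcmd(name,Unit):
--   found=0
--   name=name.upper()
--   name=name.rstrip()
--
--   if name.find("PL")>=0:
--     name=name[:2]+Unit+name[2:]
--   j=len(name)
--
--   for i in range(0,9):
--     if found==0:
--       if name.find(str(i)) >=0:
--         j=name.find(str(i))
--         found=1
--
--   if found==1:
--     Format=name[:j]+" "+name[j:]
--   if found==0:
--     Format=name
--   return Format
-- ===== SOURCE B (Python) =====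
-- def pp_2_xcmd(name, Unit):
--     name = name.upper().rstrip()
--     if "PL" in name:
--         name = name[:2] + Unit + name[2:]
--     digs = [c for c in name if "0" <= c <= "8"]
--     if not digs:
--         return name
--     chars = list(name)
--     chars.insert(name.index(min(digs)), " ")
--     return "".join(chars)
-- ===== Notes on version B (the rewrite author's own statement) =====
-- stated objective: alternative
-- what changed: A scans the name nine times (one str.find per digit 0-8 under a found flag); B does the upper/rstrip/PL prefix identically and then filters out the digit characters 0-8, takes the minimum one with min(), locates its first occurrence with str.index, and splices the space in with list.insert/join. Filter+min+index instead of nine staged find scans; not measurably faster in CPython since A's scans are C-level str.find.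
import Mathlib
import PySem

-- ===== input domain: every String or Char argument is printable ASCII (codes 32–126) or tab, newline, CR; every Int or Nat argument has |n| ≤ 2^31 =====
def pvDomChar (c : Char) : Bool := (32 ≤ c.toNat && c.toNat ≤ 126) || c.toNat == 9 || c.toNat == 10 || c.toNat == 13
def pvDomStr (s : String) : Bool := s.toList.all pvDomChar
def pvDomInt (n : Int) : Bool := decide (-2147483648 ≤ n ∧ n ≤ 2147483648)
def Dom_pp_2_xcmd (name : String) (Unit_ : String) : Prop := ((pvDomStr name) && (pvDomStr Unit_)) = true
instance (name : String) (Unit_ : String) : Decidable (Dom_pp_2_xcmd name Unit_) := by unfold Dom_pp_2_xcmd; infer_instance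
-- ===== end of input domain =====

-- B replaces A's nine sequential str.find scans (one per digit 0..8) by a filter of the
-- digit characters 0..8, taking the minimum character and the first index of that character,
-- then splicing a space in with list.insert.

-- ===== PORT A =====
-- body of A's 'for i in range(0,9)' loop; state = (found, j)
def pvAStep (cs : List Char) (st : Int × Int) (i : Int) : Int × Int :=
  if st.1 = 0 then
    if 0 ≤ PySem.Chars.find cs (PySem.Int.toChars i) then
      (1, PySem.Chars.find cs (PySem.Int.toChars i))
    else st
  else st

def pp_2_xcmd (name : String) (Unit_ : String) : String :=
  let n1 := PySem.Chars.rstrip (PySem.Chars.upper name.toList)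
  let n2 := if 0 ≤ PySem.Chars.find n1 ['P', 'L'] then
      PySem.List.slice n1 none (some 2) ++ Unit_.toList ++ PySem.List.slice n1 (some 2) none
    else n1
  let r := (PySem.List.pyRange 0 9 1).foldl (pvAStep n2) (0, (n2.length : Int))
  -- found is always 0 or 1, so the 'if found==1 / if found==0' pair is one if-else
  if r.1 = 1 then
    String.ofList (PySem.List.slice n2 none (some r.2) ++ [' '] ++ PySem.List.slice n2 (some r.2) none)
  else
    String.ofList n2

-- ===== PORT B =====
def pp_2_xcmd_alt (name : String) (Unit_ : String) : String :=
  let n1 := PySem.Chars.rstrip (PySem.Chars.upper name.toList)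
  let n2 := if PySem.Chars.isIn ['P', 'L'] n1 then
      PySem.List.slice n1 none (some 2) ++ Unit_.toList ++ PySem.List.slice n1 (some 2) none
    else n1
  let digs := n2.filter (fun c => decide ('0' ≤ c ∧ c ≤ '8'))
  match PySem.List.min? digs (fun c => c) with
  | none => String.ofList n2
  | some m =>
    -- name.index(m) cannot fail: m ∈ digs ⊆ n2; getD 0 is the port of that total .index
    String.ofList (PySem.List.insert n2 (((PySem.List.index? n2 m).getD 0 : Nat) : Int) ' ')

-- ===== PRECONDITION & SPEC =====
def Spec_pp_2_xcmd (name : String) (Unit_ : String) (out : String) : Prop := out = pp_2_xcmd_alt name Unit_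
instance (name : String) (Unit_ : String) (out : String) : Decidable (Spec_pp_2_xcmd name Unit_ out) := by unfold Spec_pp_2_xcmd; infer_instance

-- ===== CLAIM (what is proved, stated in full; the proofs are below) =====
def Claim_equal_pp_2_xcmd : Prop := ∀ (name : String) (Unit_ : String), Dom_pp_2_xcmd name Unit_ → Spec_pp_2_xcmd name Unit_ (pp_2_xcmd name Unit_)

-- ===== LEMMAS AND PROOFS =====

-- the digit character of value m (m ≤ 8)
def pvChd (m : Nat) : Char := Char.ofNat (48 + m)

-- the minimum digit value 0..8 occurring in cs, starting from b
def pvBest (cs : List Char) (b : Nat) : Nat :=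
  cs.foldl (fun a c => if '0' ≤ c ∧ c ≤ '8' ∧ c.toNat - 48 < a then c.toNat - 48 else a) b

theorem pvChd_toNat {m : Nat} (hm : m ≤ 8) : (pvChd m).toNat = 48 + m := by
  interval_cases m <;> decide

theorem pvChd_bounds {m : Nat} (hm : m ≤ 8) : '0' ≤ pvChd m ∧ pvChd m ≤ '8' := by
  interval_cases m <;> decide

theorem pvChar_le_iff (c d : Char) : (c ≤ d) ↔ c.toNat ≤ d.toNat := by
  rw [Char.le_def, UInt32.le_iff_toNat_le]; rfl

theorem pvChar_eq_of_toNat {c d : Char} (h : c.toNat = d.toNat) : c = d := by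
  apply Char.ext; exact UInt32.toNat_inj.mp h

theorem pvEq_chd {c : Char} {m : Nat} (h0 : '0' ≤ c) (h8 : c ≤ '8')
    (hv : c.toNat - 48 = m) : c = pvChd m := by
  have h0' : 48 ≤ c.toNat := (pvChar_le_iff '0' c).mp h0
  have h8' : c.toNat ≤ 56 := (pvChar_le_iff c '8').mp h8
  have hm : m ≤ 8 := by omega
  exact pvChar_eq_of_toNat (by rw [pvChd_toNat hm]; omega)

theorem pvDig_of_eq_chd {c : Char} {m : Nat} (hm : m ≤ 8) (h : c = pvChd m) :
    '0' ≤ c ∧ c ≤ '8' ∧ c.toNat - 48 = m := by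
  subst h
  refine ⟨(pvChd_bounds hm).1, (pvChd_bounds hm).2, ?_⟩
  rw [pvChd_toNat hm]
  omega

theorem pvBest_le (cs : List Char) (b : Nat) : pvBest cs b ≤ b := by
  induction cs generalizing b with
  | nil => simp [pvBest]
  | cons a t ih =>
    simp only [pvBest, List.foldl_cons]
    split
    · next h => exact le_trans (ih _) (by omega)
    · exact ih b

theorem pvBest_min {cs : List Char} {b : Nat} {c : Char} (hmem : c ∈ cs)
    (h0 : '0' ≤ c) (h8 : c ≤ '8') (hlt : c.toNat - 48 < b) :
    pvBest cs b ≤ c.toNat - 48 := by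
  induction cs generalizing b with
  | nil => simp at hmem
  | cons a t ih =>
    simp only [pvBest, List.foldl_cons]
    rcases List.mem_cons.mp hmem with rfl | hmt
    · rw [if_pos ⟨h0, h8, hlt⟩]
      exact pvBest_le t _
    · split
      · next h =>
        by_cases hcb : c.toNat - 48 < a.toNat - 48
        · exact ih hmt hcb
        · exact le_trans (pvBest_le t _) (by omega)
      · exact ih hmt hlt

theorem pvBest_mem {cs : List Char} {b : Nat} (h : pvBest cs b < b) :
    ∃ c ∈ cs, '0' ≤ c ∧ c ≤ '8' ∧ c.toNat - 48 = pvBest cs b := by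
  induction cs generalizing b with
  | nil => simp [pvBest] at h
  | cons a t ih =>
    by_cases hc : '0' ≤ a ∧ a ≤ '8' ∧ a.toNat - 48 < b
    · have hstep : pvBest (a :: t) b = pvBest t (a.toNat - 48) := by
        simp only [pvBest, List.foldl_cons, if_pos hc]
      rw [hstep] at h ⊢
      by_cases h' : pvBest t (a.toNat - 48) < a.toNat - 48
      · obtain ⟨c, hm, hc0, hc8, hcv⟩ := ih h'
        exact ⟨c, List.mem_cons_of_mem _ hm, hc0, hc8, hcv⟩
      · have hle := pvBest_le t (a.toNat - 48)
        exact ⟨a, List.mem_cons_self, hc.1, hc.2.1, by omega⟩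
    · have hstep : pvBest (a :: t) b = pvBest t b := by
        simp only [pvBest, List.foldl_cons, if_neg hc]
      rw [hstep] at h ⊢
      obtain ⟨c, hm, hc0, hc8, hcv⟩ := ih h
      exact ⟨c, List.mem_cons_of_mem _ hm, hc0, hc8, hcv⟩

-- A's loop, once found, never changes state
theorem pvAfold_frozen (cs : List Char) (ds : List Int) (j : Int) :
    ds.foldl (pvAStep cs) (1, j) = (1, j) := by
  induction ds with
  | nil => rfl
  | cons d t ih => simp [List.foldl_cons, pvAStep, ih]

-- A's loop is a first-match search over the digit list
theorem pvAfold_find (cs : List Char) (ds : List Int) (j0 : Int) :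
    ds.foldl (pvAStep cs) (0, j0) =
      match ds.find? (fun i => decide (0 ≤ PySem.Chars.find cs (PySem.Int.toChars i))) with
      | none => (0, j0)
      | some i => (1, PySem.Chars.find cs (PySem.Int.toChars i)) := by
  induction ds with
  | nil => rfl
  | cons d t ih =>
    simp only [List.foldl_cons, List.find?_cons]
    by_cases hd : 0 ≤ PySem.Chars.find cs (PySem.Int.toChars d)
    · simp only [pvAStep, hd, decide_true]
      exact pvAfold_frozen cs t _
    · simp only [pvAStep, hd, decide_false]
      exact ih

theorem pvAfold_some {cs : List Char} {i : Int} (j0 : Int)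
    (h : (PySem.List.pyRange 0 9 1).find?
      (fun i => decide (0 ≤ PySem.Chars.find cs (PySem.Int.toChars i))) = some i) :
    (PySem.List.pyRange 0 9 1).foldl (pvAStep cs) (0, j0) =
      (1, PySem.Chars.find cs (PySem.Int.toChars i)) := by
  rw [pvAfold_find, h]

theorem pvAfold_none {cs : List Char} (j0 : Int)
    (h : (PySem.List.pyRange 0 9 1).find?
      (fun i => decide (0 ≤ PySem.Chars.find cs (PySem.Int.toChars i))) = none) :
    (PySem.List.pyRange 0 9 1).foldl (pvAStep cs) (0, j0) = (0, j0) := by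
  rw [pvAfold_find, h]

theorem pvToChars_digit {m : Nat} (hm : m ≤ 8) :
    PySem.Int.toChars ((m : Nat) : Int) = [pvChd m] := by
  interval_cases m <;> decide

theorem pvSingleton_prefix {c : Char} {l : List Char} : [c] <+: l ↔ l.head? = some c := by
  constructor
  · rintro ⟨t, rfl⟩; rfl
  · intro h
    cases l with
    | nil => simp at h
    | cons a t => simp only [List.head?_cons, Option.some.injEq] at h; subst h; exact ⟨t, rfl⟩

theorem pvFind_singleton {cs : List Char} {c : Char} {k : Nat}
    (hk : PySem.List.index? cs c = some k) :
    PySem.Chars.find cs [c] = (k : Int) := by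
  rw [PySem.List.index?_eq_some_iff] at hk
  obtain ⟨pre, suf, rfl, hlen, hnotin⟩ := hk
  have hmem : c ∈ pre ++ c :: suf := by simp
  have hnn : 0 ≤ PySem.Chars.find (pre ++ c :: suf) [c] :=
    (PySem.Chars.find_nonneg_iff _ _).mpr ((List.singleton_infix_iff c _).mpr hmem)
  obtain ⟨hpref, hmin⟩ := PySem.Chars.find_spec hnn
  set f := (PySem.Chars.find (pre ++ c :: suf) [c]).toNat with hf
  have hdropk : (pre ++ c :: suf).drop k = c :: suf := by
    rw [← hlen]; exact List.drop_left
  have hfk : f = k := by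
    by_cases hlt : f < k
    · -- then (pre ++ c :: suf)[f] = c lies inside pre, contradiction with c ∉ pre
      exfalso
      have hhead : ((pre ++ c :: suf).drop f).head? = some c := pvSingleton_prefix.mp hpref
      rw [List.head?_drop] at hhead
      have hflen : f < pre.length := by omega
      have : (pre ++ c :: suf)[f]? = pre[f]? := by
        rw [List.getElem?_append_left hflen]
      rw [this] at hhead
      exact hnotin (List.mem_of_getElem? hhead)
    · by_cases hgt : k < f
      · exact absurd (pvSingleton_prefix.mpr (by rw [hdropk]; rfl)) (hmin k hgt)
      · omega
  have : PySem.Chars.find (pre ++ c :: suf) [c] = (f : Int) := by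
    omega
  rw [this, hfk]

-- presence of the digit d in cs, as A tests it
theorem pvPresent_iff (cs : List Char) {d : Nat} (hd : d ≤ 8) :
    (0 ≤ PySem.Chars.find cs (PySem.Int.toChars ((d : Nat) : Int))) ↔ pvChd d ∈ cs := by
  rw [pvToChars_digit hd, PySem.Chars.find_nonneg_iff, List.singleton_infix_iff]

theorem pvFindRange (P : Int → Bool) {m : Nat} (hm : m < 9) (h1 : P ((m : Nat) : Int) = true)
    (h2 : ∀ d : Nat, d < m → ¬ P ((d : Nat) : Int) = true) :
    (PySem.List.pyRange 0 9 1).find? P = some ((m : Nat) : Int) := by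
  rw [PySem.List.pyRange_one_append 0 (m : Int) 9 (by omega) (by omega)]
  rw [List.find?_append]
  have hnone : (PySem.List.pyRange 0 (m : Int) 1).find? P = none := by
    apply List.find?_eq_none.mpr
    intro x hx
    have hx' := (PySem.List.mem_pyRange_one).mp hx
    have hxn : x = ((x.toNat : Nat) : Int) := by omega
    rw [hxn]
    exact h2 x.toNat (by omega)
  rw [hnone, Option.none_or]
  rw [PySem.List.pyRange_one_cons (by omega)]
  simp [h1]

-- B's min over the digit filter is exactly pvChd (pvBest cs 9), when a digit exists
theorem pvMin_filter {cs : List Char} (h : pvBest cs 9 < 9) :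
    PySem.List.min? (cs.filter (fun c => decide ('0' ≤ c ∧ c ≤ '8'))) (fun c => c)
      = some (pvChd (pvBest cs 9)) := by
  have hm8 : pvBest cs 9 ≤ 8 := by omega
  obtain ⟨c, hcmem, hc0, hc8, hcv⟩ := pvBest_mem h
  have hceq : c = pvChd (pvBest cs 9) := pvEq_chd hc0 hc8 hcv
  have hfmem : pvChd (pvBest cs 9) ∈ cs.filter (fun c => decide ('0' ≤ c ∧ c ≤ '8')) := by
    rw [← hceq]
    exact List.mem_filter.mpr ⟨hcmem, by simp [hc0, hc8]⟩
  have hne : cs.filter (fun c => decide ('0' ≤ c ∧ c ≤ '8')) ≠ [] :=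
    List.ne_nil_of_mem hfmem
  have hsome : (PySem.List.min? (cs.filter (fun c => decide ('0' ≤ c ∧ c ≤ '8'))) (fun c => c)).isSome := by
    rw [Option.isSome_iff_ne_none]
    intro hx
    exact hne ((PySem.List.min?_eq_none_iff _ _).mp hx)
  obtain ⟨m, hm⟩ := Option.isSome_iff_exists.mp hsome
  rw [hm]
  have hmmem := PySem.List.min?_mem hm
  obtain ⟨hmcs, hmdig⟩ := List.mem_filter.mp hmmem
  have hmdig' : '0' ≤ m ∧ m ≤ '8' := by simpa using hmdig
  -- m ≥ the best digit
  have hm0 : 48 ≤ m.toNat := (pvChar_le_iff '0' m).mp hmdig'.1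
  have hm56 : m.toNat ≤ 56 := (pvChar_le_iff m '8').mp hmdig'.2
  have hge : pvBest cs 9 ≤ m.toNat - 48 :=
    pvBest_min hmcs hmdig'.1 hmdig'.2 (by omega)
  -- m ≤ pvChd (pvBest cs 9)
  have hle : m ≤ pvChd (pvBest cs 9) := PySem.List.min?_isMin hm (pvChd (pvBest cs 9)) hfmem
  have hle' : m.toNat ≤ 48 + pvBest cs 9 := by
    have := (pvChar_le_iff m (pvChd (pvBest cs 9))).mp hle
    rwa [pvChd_toNat hm8] at this
  congr 1
  exact pvEq_chd hmdig'.1 hmdig'.2 (by omega)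

-- the core equivalence, on the name after upper/rstrip/PL-insertion
theorem pvCore (cs : List Char) :
    (if ((PySem.List.pyRange 0 9 1).foldl (pvAStep cs) (0, (cs.length : Int))).1 = 1 then
      String.ofList (PySem.List.slice cs none (some ((PySem.List.pyRange 0 9 1).foldl (pvAStep cs) (0, (cs.length : Int))).2) ++ [' '] ++
        PySem.List.slice cs (some ((PySem.List.pyRange 0 9 1).foldl (pvAStep cs) (0, (cs.length : Int))).2) none)
    else String.ofList cs)
    =
    (match PySem.List.min? (cs.filter (fun c => decide ('0' ≤ c ∧ c ≤ '8'))) (fun c => c) with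
    | none => String.ofList cs
    | some m =>
      String.ofList (PySem.List.insert cs (((PySem.List.index? cs m).getD 0 : Nat) : Int) ' ')) := by
  by_cases h : pvBest cs 9 < 9
  · have hm8 : pvBest cs 9 ≤ 8 := by omega
    obtain ⟨c, hcmem, hc0, hc8, hcv⟩ := pvBest_mem h
    have hceq : c = pvChd (pvBest cs 9) := pvEq_chd hc0 hc8 hcv
    have hmem : pvChd (pvBest cs 9) ∈ cs := hceq ▸ hcmem
    obtain ⟨k, hk⟩ := Option.isSome_iff_exists.mp
      ((PySem.List.index?_isSome_iff cs _).mpr hmem)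
    have h1 : decide (0 ≤ PySem.Chars.find cs (PySem.Int.toChars ((pvBest cs 9 : Nat) : Int))) = true :=
      decide_eq_true ((pvPresent_iff cs hm8).mpr hmem)
    have h2 : ∀ d : Nat, d < pvBest cs 9 →
        ¬ (decide (0 ≤ PySem.Chars.find cs (PySem.Int.toChars ((d : Nat) : Int))) = true) := by
      intro d hd hP
      have hd8 : d ≤ 8 := by omega
      have hmemd : pvChd d ∈ cs := (pvPresent_iff cs hd8).mp (of_decide_eq_true hP)
      have hdig := pvDig_of_eq_chd hd8 (rfl : pvChd d = pvChd d)
      have hv := hdig.2.2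
      have := pvBest_min (b := 9) hmemd hdig.1 hdig.2.1 (by omega)
      omega
    rw [pvAfold_some ((cs.length : Int)) (pvFindRange _ (by omega) h1 h2)]
    rw [pvToChars_digit hm8, pvMin_filter h, pvFind_singleton hk]
    -- k ≤ cs.length, so insert = take/drop split
    obtain ⟨hklt, _, _⟩ := PySem.List.getElem_of_index?_eq_some hk
    simp only [hk, Option.getD_some]
    rw [if_pos trivial, PySem.List.insert_natCast cs k ' ' (by omega),
      PySem.List.slice_to_natCast, PySem.List.slice_from_natCast]
    simp
  · have hnone : (PySem.List.pyRange 0 9 1).find?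
        (fun i => decide (0 ≤ PySem.Chars.find cs (PySem.Int.toChars i))) = none := by
      apply List.find?_eq_none.mpr
      intro x hx
      have hx' := PySem.List.mem_pyRange_one.mp hx
      intro hP
      have hxn : ((x.toNat : Nat) : Int) = x := by omega
      rw [← hxn] at hP
      have hx8 : x.toNat ≤ 8 := by omega
      have hmemd : pvChd x.toNat ∈ cs := (pvPresent_iff cs hx8).mp (of_decide_eq_true hP)
      have hdig := pvDig_of_eq_chd hx8 (rfl : pvChd x.toNat = pvChd x.toNat)
      have hv := hdig.2.2
      have := pvBest_min (b := 9) hmemd hdig.1 hdig.2.1 (by omega)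
      omega
    have hfempty : cs.filter (fun c => decide ('0' ≤ c ∧ c ≤ '8')) = [] := by
      rw [List.filter_eq_nil_iff]
      intro c hc hdec
      obtain ⟨hc0, hc8⟩ := of_decide_eq_true hdec
      have h48 : 48 ≤ c.toNat := (pvChar_le_iff '0' c).mp hc0
      have h56 : c.toNat ≤ 56 := (pvChar_le_iff c '8').mp hc8
      have := pvBest_min (b := 9) hc hc0 hc8 (by omega)
      omega
    rw [pvAfold_none ((cs.length : Int)) hnone, hfempty]
    simp [PySem.List.min?]

-- ===== VERDICT (by name: the statement is the Claim_ definition above) =====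
theorem pp_2_xcmd_spec : Claim_equal_pp_2_xcmd := by
  intro name Unit_ _
  unfold Spec_pp_2_xcmd pp_2_xcmd pp_2_xcmd_alt
  have hcond : (0 ≤ PySem.Chars.find (PySem.Chars.rstrip (PySem.Chars.upper name.toList)) ['P', 'L']) ↔
      (PySem.Chars.isIn ['P', 'L'] (PySem.Chars.rstrip (PySem.Chars.upper name.toList)) = true) := by
    rw [PySem.Chars.find_nonneg_iff, PySem.Chars.isIn_iff_infix]
  simp only [hcond]
  exact pvCore _
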